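-- pv_equiv track=rewrite | github.com/VenusGrape/MITx-6.00.1x- | biggest.py | biggest_val
-- ===== SOURCE A (Python) =====
-- def biggest_val(aDict):
--     '''
--     aDict: A dictionary, where all the values are lists.
--
--     returns: The key with the largest number of values associated with it
--     '''
--     # Your Code Here
--     bgk = []
--     val = aDict.values()
--     ky = aDict.keys()
--
--     biggest = 0
--     for i in val:
--         if len(i) > biggest:
--             biggest = len(i)
--
--     for k in ky:
--        if len(aDict[k]) >= biggest:
--            bgk.append(k)
--
--     return bgk[0]
-- ===== SOURCE B (Python) =====
-- def biggest_val(aDict):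
--     '''
--     aDict: A dictionary, where all the values are lists.
--
--     returns: The key with the largest number of values associated with it
--     '''
--     return max(aDict, key=lambda k: len(aDict[k]))
-- ===== Notes on version B (the rewrite author's own statement) =====
-- stated objective: idiomatic
-- what changed: Replaced the two explicit passes (a max-length scan followed by a scan collecting every key meeting that length, indexing the first) by a single builtin max(aDict, key=...) call, which returns the first key of maximal list length directly.
import Mathlib
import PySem

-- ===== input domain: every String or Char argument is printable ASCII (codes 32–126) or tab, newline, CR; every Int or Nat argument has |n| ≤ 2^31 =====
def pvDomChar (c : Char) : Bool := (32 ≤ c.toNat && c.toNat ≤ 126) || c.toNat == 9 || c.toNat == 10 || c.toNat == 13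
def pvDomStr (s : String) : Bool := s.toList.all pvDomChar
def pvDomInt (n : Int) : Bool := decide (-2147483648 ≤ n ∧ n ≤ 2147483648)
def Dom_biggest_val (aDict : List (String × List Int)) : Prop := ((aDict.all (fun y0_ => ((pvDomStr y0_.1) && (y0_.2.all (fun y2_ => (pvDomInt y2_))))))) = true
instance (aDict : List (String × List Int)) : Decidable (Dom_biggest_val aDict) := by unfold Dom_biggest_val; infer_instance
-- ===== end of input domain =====

-- B replaces A's two explicit passes by a single idiomatic max(aDict, key=...) call; return values agree on every non-empty dict.

-- ===== PORT A =====
-- literal transliteration of A: a max-length scan over the values, then a scan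
-- over the keys collecting every key whose list reaches that length, then bgk[0]
def biggest_val (aDict : List (String × List Int)) : String :=
  let d := PySem.Dict.ofList aDict
  let val := d.values
  let ky := d.keys
  let biggest : Int :=
    val.foldl (fun biggest i => if (i.length : Int) > biggest then (i.length : Int) else biggest) 0
  let bgk : List String :=
    ky.foldl (fun bgk k => if ((d.getD k []).length : Int) ≥ biggest then bgk ++ [k] else bgk) []
  (PySem.List.pyGet? bgk 0).getD ""   -- bgk[0]; none (= IndexError) only for the empty dict, excluded by Pre_

-- ===== PORT B =====
-- transliteration of B: max(aDict, key=lambda k: len(aDict[k])) — first maximal key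
def biggest_val_alt (aDict : List (String × List Int)) : String :=
  let d := PySem.Dict.ofList aDict
  (PySem.List.max? d.keys (fun k => ((d.getD k []).length : Int))).getD ""   -- none (= ValueError) only for the empty dict

-- ===== PRECONDITION & SPEC =====
-- Pre_ excludes only the empty dict, on which A raises IndexError (and B raises ValueError).
def Pre_biggest_val (aDict : List (String × List Int)) : Prop := aDict ≠ []
instance (aDict : List (String × List Int)) : Decidable (Pre_biggest_val aDict) := by unfold Pre_biggest_val; infer_instance
def pvWitness_biggest_val : (List (String × List Int)) := [("a", [1, 2]), ("b", [3])]

def Spec_biggest_val (aDict : List (String × List Int)) (out : String) : Prop := out = biggest_val_alt aDict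
instance (aDict : List (String × List Int)) (out : String) : Decidable (Spec_biggest_val aDict out) := by unfold Spec_biggest_val; infer_instance

-- ===== CLAIM (what is proved, stated in full; the proofs are below) =====
def Claim_equal_biggest_val : Prop := ∀ (aDict : List (String × List Int)), Dom_biggest_val aDict → Pre_biggest_val aDict → Spec_biggest_val aDict (biggest_val aDict)

-- ===== LEMMAS AND PROOFS =====

-- xs[0] is xs.head?
theorem pv_pyGet_zero (xs : List String) : PySem.List.pyGet? xs 0 = xs.head? := by
  cases xs <;> simp [PySem.List.pyGet?, PySem.List.pyIdx?]

-- A's first loop is a running max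
theorem pv_fold_if_eq_fold_max (ks : List String) (f : String → Int) (b : Int) :
    ks.foldl (fun b k => if f k > b then f k else b) b
      = ks.foldl (fun b k => max b (f k)) b := by
  induction ks generalizing b with
  | nil => rfl
  | cons k t ih =>
      simp only [List.foldl_cons]
      have : (if f k > b then f k else b) = max b (f k) := by
        simp only [max_def]; split_ifs <;> omega
      rw [this, ih]

-- the seed never exceeds a running max
theorem pv_seed_le_fold_max (ks : List String) (f : String → Int) (b : Int) :
    b ≤ ks.foldl (fun b k => max b (f k)) b := by
  induction ks generalizing b with
  | nil => exact le_refl b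
  | cons k t ih => exact le_trans (le_max_left b (f k)) (ih (max b (f k)))

-- every element is below the running max
theorem pv_mem_le_fold_max (ks : List String) (f : String → Int) (b : Int) :
    ∀ x ∈ ks, f x ≤ ks.foldl (fun b k => max b (f k)) b := by
  induction ks generalizing b with
  | nil => intro x hx; cases hx
  | cons k t ih =>
      intro x hx
      rcases List.mem_cons.mp hx with rfl | hx
      · exact le_trans (le_max_right b (f x)) (pv_seed_le_fold_max t f _)
      · exact ih _ x hx

-- the running max is the seed or attained
theorem pv_fold_max_attained (ks : List String) (f : String → Int) (b : Int) :
    ks.foldl (fun b k => max b (f k)) b = b ∨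
      ∃ x ∈ ks, f x = ks.foldl (fun b k => max b (f k)) b := by
  induction ks generalizing b with
  | nil => exact Or.inl rfl
  | cons k t ih =>
      simp only [List.foldl_cons]
      rcases ih (max b (f k)) with h | ⟨x, hx, hfx⟩
      · rw [h]
        rcases le_total b (f k) with hbk | hbk
        · exact Or.inr ⟨k, List.mem_cons_self, by rw [max_eq_right hbk]⟩
        · exact Or.inl (max_eq_left hbk)
      · exact Or.inr ⟨x, List.mem_cons_of_mem _ hx, hfx⟩

-- A's second loop is acc ++ filter
theorem pv_fold_app_filter (ks : List String) (f : String → Int) (M : Int) (acc : List String) :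
    ks.foldl (fun bgk k => if f k ≥ M then bgk ++ [k] else bgk) acc
      = acc ++ ks.filter (fun k => decide (M ≤ f k)) := by
  induction ks generalizing acc with
  | nil => simp
  | cons k t ih =>
      simp only [List.foldl_cons, List.filter_cons, ge_iff_le]
      by_cases h : M ≤ f k
      · simp [h, ih]
      · simp [h, ih]

-- max?'s fold step, named
def pvStep (f : String → Int) (acc : Option String) (x : String) : Option String :=
  match acc with
  | none => some x
  | some m => if f m < f x then some x else some m

theorem pv_max?_eq_foldl (ks : List String) (f : String → Int) :
    PySem.List.max? ks f = ks.foldl (pvStep f) none := by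
  unfold PySem.List.max?
  congr 1
  funext acc x
  cases acc <;> rfl

-- once a maximal element is current, the max? fold keeps it
theorem pv_maxfold_stay (t : List String) (f : String → Int) (m : String)
    (h : ∀ x ∈ t, f x ≤ f m) :
    t.foldl (pvStep f) (some m) = some m := by
  induction t with
  | nil => rfl
  | cons x t' ih =>
      simp only [List.foldl_cons, pvStep]
      have hx : ¬ f m < f x := not_lt.mpr (h x List.mem_cons_self)
      simp only [hx, if_false]
      exact ih (fun y hy => h y (List.mem_cons_of_mem _ hy))

-- from a sub-maximal seed, the max? fold finds the first maximal element
theorem pv_maxfold_seed (t : List String) (f : String → Int) (M : Int) (m : String)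
    (hm : f m < M) (hub : ∀ x ∈ t, f x ≤ M) (hat : ∃ x ∈ t, f x = M) :
    t.foldl (pvStep f) (some m)
      = (t.filter (fun x => decide (M ≤ f x))).head? := by
  induction t generalizing m with
  | nil => rcases hat with ⟨x, hx, _⟩; cases hx
  | cons x t' ih =>
      simp only [List.foldl_cons, List.filter_cons, pvStep]
      by_cases hx : M ≤ f x
      · have hxM : f x = M := le_antisymm (hub x List.mem_cons_self) hx
        have : f m < f x := by omega
        simp only [this, if_true, hx, decide_true]
        rw [pv_maxfold_stay t' f x (fun y hy => by
          have := hub y (List.mem_cons_of_mem _ hy); omega)]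
        simp
      · have hxlt : f x < M := lt_of_le_of_ne (hub x List.mem_cons_self) (fun h => hx (le_of_eq h.symm))
        have hat' : ∃ y ∈ t', f y = M := by
          rcases hat with ⟨y, hy, hfy⟩
          rcases List.mem_cons.mp hy with rfl | hy'
          · omega
          · exact ⟨y, hy', hfy⟩
        have hub' : ∀ y ∈ t', f y ≤ M := fun y hy => hub y (List.mem_cons_of_mem _ hy)
        simp only [decide_eq_true_eq, hx, if_false]
        by_cases hmx : f m < f x
        · simp only [hmx, if_true]; exact ih x hxlt hub' hat'
        · simp only [hmx, if_false]; exact ih m hm hub' hat'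

-- max? is the first element of the filter keeping the maximal ones
theorem pv_max?_eq_filter_head (ks : List String) (f : String → Int) (M : Int)
    (hub : ∀ x ∈ ks, f x ≤ M) (hat : ∃ x ∈ ks, f x = M) :
    PySem.List.max? ks f = (ks.filter (fun x => decide (M ≤ f x))).head? := by
  cases ks with
  | nil => rcases hat with ⟨x, hx, _⟩; cases hx
  | cons k t =>
      rw [pv_max?_eq_foldl]
      simp only [List.foldl_cons, List.filter_cons, pvStep]
      by_cases hk : M ≤ f k
      · have hkM : f k = M := le_antisymm (hub k List.mem_cons_self) hk
        simp only [hk, decide_true]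
        rw [pv_maxfold_stay t f k (fun y hy => by
          have := hub y (List.mem_cons_of_mem _ hy); omega)]
        simp
      · have hklt : f k < M := lt_of_le_of_ne (hub k List.mem_cons_self) (fun h => hk (le_of_eq h.symm))
        have hat' : ∃ y ∈ t, f y = M := by
          rcases hat with ⟨y, hy, hfy⟩
          rcases List.mem_cons.mp hy with rfl | hy'
          · omega
          · exact ⟨y, hy', hfy⟩
        simp only [decide_eq_true_eq, hk, if_false]
        exact pv_maxfold_seed t f M k hklt (fun y hy => hub y (List.mem_cons_of_mem _ hy)) hat'

-- the shared core: A's pipeline equals max?, over any key list with nonnegative key function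
theorem pv_core (ks : List String) (f : String → Int) (h0 : ∀ x ∈ ks, 0 ≤ f x) :
    (PySem.List.pyGet? (ks.foldl (fun bgk k =>
        if f k ≥ ks.foldl (fun b k => if f k > b then f k else b) 0 then bgk ++ [k] else bgk) []) 0).getD ""
      = (PySem.List.max? ks f).getD "" := by
  rw [pv_fold_app_filter, pv_pyGet_zero, List.nil_append]
  cases ks with
  | nil => rfl
  | cons k t =>
      set M : Int := (k :: t).foldl (fun b k => if f k > b then f k else b) 0 with hM
      have hM' : M = (k :: t).foldl (fun b k => max b (f k)) 0 := by
        rw [hM, pv_fold_if_eq_fold_max]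
      have hub : ∀ x ∈ (k :: t), f x ≤ M := by
        rw [hM']; exact pv_mem_le_fold_max (k :: t) f 0
      have hat : ∃ x ∈ (k :: t), f x = M := by
        rcases pv_fold_max_attained (k :: t) f 0 with h | h
        · refine ⟨k, List.mem_cons_self, ?_⟩
          have h1 : f k ≤ M := hub k List.mem_cons_self
          have h2 : 0 ≤ f k := h0 k List.mem_cons_self
          rw [hM'] at h1 ⊢; omega
        · rw [hM']; exact h
      rw [pv_max?_eq_filter_head (k :: t) f M hub hat]

-- ===== VERDICT (by name: the statement is the Claim_ definition above) =====
theorem biggest_val_spec : Claim_equal_biggest_val := by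
  intro aDict _ _
  unfold Spec_biggest_val biggest_val biggest_val_alt
  simp only []
  set d := PySem.Dict.ofList aDict with hd
  have hnd : d.keys.Nodup := PySem.Dict.nodup_keys_ofList aDict
  rw [PySem.Dict.values_eq_map_keys d hnd [], List.foldl_map]
  exact pv_core d.keys (fun k => ((d.getD k []).length : Int))
    (fun x _ => Int.natCast_nonneg _)
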